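-- pv_equiv track=rewrite | github.com/Raclsc/LeetCode | 999_Available_Captures_for_Rook.py | numRookCaptures
-- ===== SOURCE A (Python) =====
-- def numRookCaptures(board):
--     """
--     :type board: List[List[str]]
--     :rtype: int
--     """
--     for i in range(len(board)):
--         if "R" in board[i]:
--             j = board[i].index("R")
--             break
--
--     n = 0
--     for k in range(i,-1,-1):
--         if board[k][j] == "B":
--             break
--         elif board[k][j] == "p":
--             n += 1
--             break
--
--     for k in range(j,-1,-1):
--         if board[i][k] == "B":
--             break
--         elif board[i][k] == "p":
--             n += 1
--             break
--
--     for k in range(i,len(board)):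
--         if board[k][j] == "B":
--             break
--         elif board[k][j] == "p":
--             n += 1
--             break
--
--     for k in range(j,len(board[i])):
--         if board[i][k] == "B":
--             break
--         elif board[i][k] == "p":
--             n += 1
--             break
--
--     return n
-- ===== SOURCE B (Python) =====
-- def numRookCaptures(board):
--     for i, row in enumerate(board):
--         if "R" in row:
--             j = row.index("R")
--             break
--
--     n = 0
--     for cells, pos in ((board[i], j), ([row[j] for row in board], i)):
--         occ = [k for k in range(len(cells)) if cells[k] in ("B", "p") or k == pos]
--         r = occ.index(pos)
--         n += r > 0 and cells[occ[r - 1]] == "p"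
--         n += r + 1 < len(occ) and cells[occ[r + 1]] == "p"
--     return n
-- ===== Notes on version B (the rewrite author's own statement) =====
-- stated objective: alternative
-- what changed: Instead of A's four break-driven directional scans, B builds per axis the index list of blocking squares ('B'/'p' plus the rook's square), finds the rook's rank in that list and counts how many of its two list-neighbours are pawns.
-- outside the precondition, e.g. on numRookCaptures([['x', 'R'], ['y', 'p'], ['z']]): A returns 1, B raises IndexError
import Mathlib
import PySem

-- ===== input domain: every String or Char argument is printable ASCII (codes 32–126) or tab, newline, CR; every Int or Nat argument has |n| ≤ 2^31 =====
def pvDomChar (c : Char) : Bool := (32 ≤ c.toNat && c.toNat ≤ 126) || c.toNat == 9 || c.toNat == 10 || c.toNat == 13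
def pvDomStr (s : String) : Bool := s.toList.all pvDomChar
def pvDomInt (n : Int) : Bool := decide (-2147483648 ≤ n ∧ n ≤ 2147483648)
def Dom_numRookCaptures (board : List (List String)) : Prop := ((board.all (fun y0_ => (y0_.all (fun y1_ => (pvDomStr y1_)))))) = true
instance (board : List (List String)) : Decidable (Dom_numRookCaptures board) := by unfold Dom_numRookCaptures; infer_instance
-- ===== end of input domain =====

-- B replaces A's four break-driven directional scans by, per axis, building the index list of the
-- blocking squares ('B'/'p' plus the rook's square), locating the rook's rank in that list and
-- checking whether its two neighbours there are pawns (objective: alternative decomposition).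

-- shared helper: locate the rook — the first row containing "R" and the index of "R" in it
-- (both Pythons find it by the same left-to-right scan; none = no rook, where Python raises)
def findRook : List (List String) → Option (Nat × Nat)
  | [] => none
  | row :: rest =>
      if "R" ∈ row then (PySem.List.index? row "R").map (fun j => (0, j))
      else (findRook rest).map (fun p => (p.1 + 1, p.2))

-- ===== PORT A =====
-- A's break-driven loop over a list of indices: stop at "B", stop and count at "p"
def scanBreak (cell : Int → String) : List Int → Int → Int
  | [], n => n
  | k :: ks, n =>
      if cell k = "B" then n
      else if cell k = "p" then n + 1
      else scanBreak cell ks n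

def numRookCaptures (board : List (List String)) : Int :=
  match findRook board with
  | none => 0  -- Python raises NameError here; excluded by Pre_
  | some (i, j) =>
      let colCell : Int → String := fun k => PySem.List.pyGetD (PySem.List.pyGetD board k []) (j : Int) ""
      let rowCell : Int → String := fun k => PySem.List.pyGetD (PySem.List.pyGetD board (i : Int) []) k ""
      let n0 := scanBreak colCell (PySem.List.pyRange (i : Int) (-1) (-1)) 0
      let n1 := scanBreak rowCell (PySem.List.pyRange (j : Int) (-1) (-1)) n0
      let n2 := scanBreak colCell (PySem.List.pyRange (i : Int) (board.length : Int) 1) n1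
      scanBreak rowCell (PySem.List.pyRange (j : Int) ((PySem.List.pyGetD board (i : Int) []).length : Int) 1) n2

-- ===== PORT B =====
-- occ = [k for k in range(len(cells)) if cells[k] in ("B", "p") or k == pos]
def occList (cells : List String) (pos : Int) : List Int :=
  (PySem.List.pyRange 0 (cells.length : Int) 1).filter
    (fun k => PySem.List.pyGetD cells k "" = "B" || PySem.List.pyGetD cells k "" = "p" || k = pos)

-- r = occ.index(pos); n += r > 0 and cells[occ[r-1]] == "p"; n += r+1 < len(occ) and cells[occ[r+1]] == "p"
def axisCount (cells : List String) (pos : Int) : Int :=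
  let occ := occList cells pos
  match PySem.List.index? occ pos with
  | none => 0  -- unreachable: Python's occ.index(pos) always finds pos (0 ≤ pos < len(cells))
  | some r =>
      (if 0 < r ∧ PySem.List.pyGetD cells (occ.getD (r - 1) 0) "" = "p" then 1 else 0)
      + (if r + 1 < occ.length ∧ PySem.List.pyGetD cells (occ.getD (r + 1) 0) "" = "p" then 1 else 0)

def numRookCaptures_alt (board : List (List String)) : Int :=
  match findRook board with
  | none => 0  -- Python raises NameError here; excluded by Pre_
  | some (i, j) =>
      axisCount (PySem.List.pyGetD board (i : Int) []) (j : Int)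
      + axisCount (board.map (fun row => PySem.List.pyGetD row (j : Int) "")) (i : Int)

-- ===== PRECONDITION & SPEC =====
-- Pre_ excludes boards with no rook, on which both Pythons raise NameError, and ragged boards where
-- some row does not reach the rook's column: there B (which builds the whole column) raises
-- IndexError while A raises too or happens to break off before reaching the short row.
def Pre_numRookCaptures (board : List (List String)) : Prop :=
  ∃ i < board.length, ∃ j < (board.getD i []).length,
    (board.getD i []).getD j "" = "R" ∧
    (∀ k < i, "R" ∉ board.getD k []) ∧
    (∀ k < j, (board.getD i []).getD k "" ≠ "R") ∧
    (∀ row ∈ board, j < row.length)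

instance (board : List (List String)) : Decidable (Pre_numRookCaptures board) := by
  unfold Pre_numRookCaptures; infer_instance

def pvWitness_numRookCaptures : List (List String) := [[".", "R", ".", "p"], ["B", "p", ".", "."]]

def Spec_numRookCaptures (board : List (List String)) (out : Int) : Prop := out = numRookCaptures_alt board
instance (board : List (List String)) (out : Int) : Decidable (Spec_numRookCaptures board out) := by unfold Spec_numRookCaptures; infer_instance

-- ===== CLAIM (what is proved, stated in full; the proofs are below) =====
def Claim_equal_numRookCaptures : Prop := ∀ (board : List (List String)), Dom_numRookCaptures board → Pre_numRookCaptures board → Spec_numRookCaptures board (numRookCaptures board)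

-- ===== LEMMAS AND PROOFS =====

-- proof-side vocabulary: a blocking square, and the first blocking square of a ray
def blkBP (c : String) : Bool := c = "B" || c = "p"

def firstBP (ray : List String) : Option String := ray.find? blkBP

lemma findRook_spec (board : List (List String)) (i j : Nat)
    (h : findRook board = some (i, j)) :
    ∃ hi : i < board.length, PySem.List.index? board[i] "R" = some j := by
  induction board generalizing i with
  | nil => simp [findRook] at h
  | cons row rest ih =>
      by_cases hr : "R" ∈ row
      · simp [findRook, hr] at h
        obtain ⟨hj', hi0⟩ := h
        subst hi0
        exact ⟨by simp, by simpa [PySem.List.index?_eq_idxOf?] using hj'⟩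
      · simp [findRook, hr] at h
        obtain ⟨i', hfr, hi0⟩ := h
        obtain ⟨hi', hidx⟩ := ih i' hfr
        subst hi0
        exact ⟨by simpa using Nat.succ_lt_succ hi', by simpa using hidx⟩

lemma findRook_eq_some (board : List (List String)) (i j : Nat)
    (hi : i < board.length)
    (hfirst : ∀ k < i, "R" ∉ board.getD k [])
    (hidx : PySem.List.index? (board.getD i []) "R" = some j) :
    findRook board = some (i, j) := by
  induction board generalizing i with
  | nil => simp at hi
  | cons row rest ih =>
      cases i with
      | zero =>
          have hR : "R" ∈ row := by
            have := PySem.List.index?_isSome_iff (xs := row) (v := "R")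
            simp only [List.getD_cons_zero] at hidx
            rw [← this, hidx]; rfl
          simp only [List.getD_cons_zero] at hidx
          rw [PySem.List.index?_eq_idxOf?] at hidx
          simp [findRook, hR, hidx]
      | succ k =>
          have h0 : "R" ∉ row := by
            have := hfirst 0 (Nat.succ_pos k)
            simpa using this
          have hrec := ih k (by simpa using hi)
            (fun m hm => by simpa using hfirst (m + 1) (by omega))
            (by simpa using hidx)
          simp [findRook, h0, hrec]

lemma scanBreak_eq (cell : Int → String) (ks : List Int) (n : Int) :
    scanBreak cell ks n = n + (if firstBP (ks.map cell) = some "p" then 1 else 0) := by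
  induction ks generalizing n with
  | nil => simp [scanBreak, firstBP]
  | cons k ks ih =>
      by_cases hB : cell k = "B"
      · simp [scanBreak, firstBP, blkBP, hB]
      · by_cases hp : cell k = "p"
        · simp [scanBreak, firstBP, blkBP, hp]
        · simp [scanBreak, firstBP, blkBP, hB, hp, ih]

lemma firstBP_cons_skip (c : String) (l : List String) (hB : c ≠ "B") (hp : c ≠ "p") :
    firstBP (c :: l) = firstBP l := by
  simp [firstBP, blkBP, hB, hp]

lemma map_range_take (xs : List String) (m : Nat) (hm : m ≤ xs.length) (f : Int → String)
    (hf : ∀ k : Nat, k < m → f (k : Int) = xs[k]?.getD "") :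
    (PySem.List.pyRange 0 (m : Int) 1).map f = xs.take m := by
  induction m with
  | zero => simp [PySem.List.pyRange_one_eq_nil]
  | succ m ih =>
      have h1 : ((m + 1 : Nat) : Int) = (m : Int) + 1 := by push_cast; ring
      rw [h1, PySem.List.pyRange_one_succ_right (by positivity), List.map_append,
          ih (by omega) (fun k hk => hf k (by omega)), List.take_add_one]
      have hmlt : m < xs.length := by omega
      simp [hf m (by omega), List.getElem?_eq_getElem hmlt]

lemma map_range_drop (xs : List String) (a : Nat) (f : Int → String)
    (hf : ∀ k : Nat, k < xs.length → f (k : Int) = xs[k]?.getD "") :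
    (PySem.List.pyRange (a : Int) (xs.length : Int) 1).map f = xs.drop a := by
  have hbase := PySem.List.map_pyGetD_pyRange' xs "" (a := (a : Int)) (by positivity)
  rw [Int.toNat_natCast] at hbase
  rw [← hbase]
  apply List.map_congr_left
  intro k hk
  obtain ⟨h0, h1⟩ := PySem.List.mem_pyRange_one.mp hk
  obtain ⟨kn, rfl⟩ : ∃ kn : Nat, k = (kn : Int) := ⟨k.toNat, (Int.toNat_of_nonneg (by omega)).symm⟩
  have hkn : kn < xs.length := by exact_mod_cast h1
  rw [hf kn hkn, PySem.List.pyGetD_natCast, List.getD_eq_getElem?_getD]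

-- ---------- B-side: characterisation of occList / axisCount ----------

-- the Nat-index version of occList
def occN (cells : List String) (p : Nat) : List Nat :=
  (List.range cells.length).filter (fun k => blkBP (cells.getD k "") || k == p)

lemma occList_eq_map (cells : List String) (p : Nat) :
    occList cells (p : Int) = (occN cells p).map (Nat.cast : Nat → Int) := by
  rw [occList, occN, PySem.List.pyRange_one, List.filter_map]
  simp only [Int.sub_zero, Int.toNat_natCast, zero_add]
  congr 1
  apply List.filter_congr
  intro k hk
  by_cases h : k = p <;> simp [PySem.List.pyGetD_natCast, blkBP, Function.comp, h]

lemma index?_map_cast (l : List Nat) (a : Nat) :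
    PySem.List.index? (l.map (Nat.cast : Nat → Int)) ((a : Nat) : Int) = PySem.List.index? l a := by
  induction l with
  | nil => simp [PySem.List.index?_eq_idxOf?]
  | cons x t ih =>
      by_cases hx : x = a
      · subst hx
        rw [List.map_cons, PySem.List.index?_cons_self, PySem.List.index?_cons_self]
      · rw [List.map_cons,
            PySem.List.index?_cons_of_ne _ (by exact_mod_cast hx),
            PySem.List.index?_cons_of_ne _ hx, ih]

-- first blocker of a ray, as the head of the filtered index list
lemma find?_eq_head_filter (xs : List String) :
    xs.find? blkBP
      = (((List.range xs.length).filter (fun k => blkBP (xs.getD k ""))).head?).map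
          (fun k => xs.getD k "") := by
  induction xs with
  | nil => simp
  | cons x t ih =>
      rw [List.length_cons, List.range_succ_eq_map, List.filter_cons]
      simp only [List.getD_cons_zero]
      by_cases hx : blkBP x
      · rw [if_pos hx, List.find?_cons_of_pos hx]
        simp
      · rw [if_neg hx, List.find?_cons_of_neg hx, List.filter_map, List.head?_map,
            Option.map_map, ih]
        have hpred : ((fun k => blkBP ((x :: t).getD k "")) ∘ Nat.succ)
            = (fun k => blkBP (t.getD k "")) := by
          funext k; simp [Function.comp]
        have hfun : ((fun k => (x :: t).getD k "") ∘ Nat.succ)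
            = (fun k => t.getD k "") := by
          funext k; simp [Function.comp]
        rw [hpred, hfun]

-- first blocker of a reversed ray, as the last of the filtered index list
lemma find?_reverse_eq_getLast_filter (xs : List String) :
    xs.reverse.find? blkBP
      = (((List.range xs.length).filter (fun k => blkBP (xs.getD k ""))).getLast?).map
          (fun k => xs.getD k "") := by
  induction xs using List.reverseRecOn with
  | nil => simp
  | append_singleton ys a ih =>
      rw [List.reverse_append, List.length_append]
      simp only [List.length_singleton, List.range_succ, List.filter_append]
      have hgd : ∀ k < ys.length, (ys ++ [a]).getD k "" = ys.getD k "" := by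
        intro k hk
        simp [List.getD_eq_getElem?_getD, List.getElem?_append_left hk]
      have hga : (ys ++ [a]).getD ys.length "" = a := by
        simp [List.getD_eq_getElem?_getD]
      have hfil : (List.range ys.length).filter (fun k => blkBP ((ys ++ [a]).getD k ""))
          = (List.range ys.length).filter (fun k => blkBP (ys.getD k "")) := by
        apply List.filter_congr
        intro k hk
        rw [hgd k (List.mem_range.mp hk)]
      by_cases ha : blkBP a
      · rw [List.reverse_singleton, List.singleton_append, List.find?_cons_of_pos ha]
        have hfa : List.filter (fun k => blkBP ((ys ++ [a]).getD k "")) [ys.length]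
            = [ys.length] := by simp [ha]
        rw [hfa, List.getLast?_concat]
        simp
      · rw [List.reverse_singleton, List.singleton_append, List.find?_cons_of_neg ha, ih, hfil]
        have hfa : List.filter (fun k => blkBP ((ys ++ [a]).getD k "")) [ys.length]
            = [] := by simp [ha]
        rw [hfa, List.append_nil]
        cases h : ((List.range ys.length).filter (fun k => blkBP (ys.getD k ""))).getLast? with
        | none => simp
        | some k =>
            have hk : k < ys.length :=
              List.mem_range.mp (List.mem_of_mem_filter (List.mem_of_getLast? h))
            simp [List.getElem?_append_left hk]

-- decomposition of the blocker-index list around the rook's square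
lemma occN_decomp (cells : List String) (p : Nat) (hp : p < cells.length) :
    occN cells p
      = ((List.range p).filter (fun k => blkBP (cells.getD k "")))
        ++ p :: (((List.range (cells.length - (p + 1))).filter
              (fun k => blkBP (cells.getD (p + 1 + k) ""))).map (fun k => p + 1 + k)) := by
  have hlen : cells.length = p + 1 + (cells.length - (p + 1)) := by omega
  rw [occN, hlen, List.range_add, List.filter_append, List.range_succ, List.filter_append]
  have h1 : List.filter (fun k => blkBP (cells.getD k "") || k == p) [p] = [p] := by simp
  have h2 : List.filter (fun k => blkBP (cells.getD k "") || k == p) (List.range p)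
      = List.filter (fun k => blkBP (cells.getD k "")) (List.range p) := by
    apply List.filter_congr
    intro k hk
    have : k ≠ p := by have := List.mem_range.mp hk; omega
    simp [this]
  have h3 : List.filter (fun k => blkBP (cells.getD k "") || k == p)
        (List.map (fun x => p + 1 + x) (List.range (cells.length - (p + 1))))
      = List.map (fun k => p + 1 + k)
          (List.filter (fun k => blkBP (cells.getD (p + 1 + k) ""))
            (List.range (cells.length - (p + 1)))) := by
    rw [List.filter_map]
    congr 1
    apply List.filter_congr
    intro k hk
    have : p + 1 + k ≠ p := by omega
    simp [Function.comp, this]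
  rw [h1, h2, h3, List.append_assoc, List.singleton_append, Nat.add_sub_cancel_left]

-- the axis count equals: first blocker left of the rook is a pawn, plus first blocker right of it
lemma axisCount_eq (cells : List String) (p : Nat) (hp : p < cells.length) :
    axisCount cells (p : Int)
      = (if firstBP ((cells.take p).reverse) = some "p" then 1 else 0)
        + (if firstBP (cells.drop (p + 1)) = some "p" then 1 else 0) := by
  set L := (List.range p).filter (fun k => blkBP (cells.getD k "")) with hLdef
  set Rin := (List.range (cells.length - (p + 1))).filter
      (fun k => blkBP (cells.getD (p + 1 + k) "")) with hRdef
  have hdec : occN cells p = L ++ p :: Rin.map (fun k => p + 1 + k) := occN_decomp cells p hp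
  have hocc : occList cells (p : Int)
      = (L ++ p :: Rin.map (fun k => p + 1 + k)).map (Nat.cast : Nat → Int) := by
    rw [occList_eq_map, hdec]
  have hpL : p ∉ L := by
    intro hmem
    exact absurd (List.mem_range.mp (List.mem_of_mem_filter hmem)) (lt_irrefl p)
  have hidx : PySem.List.index? (occList cells (p : Int)) ((p : Nat) : Int) = some L.length := by
    rw [hocc, index?_map_cast,
        show L ++ p :: Rin.map (fun k => p + 1 + k)
          = (L ++ [p]) ++ Rin.map (fun k => p + 1 + k) by simp,
        PySem.List.index?_append_of_mem _ (by simp),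
        PySem.List.index?_append_singleton_self L p hpL]
  have hlen : (occList cells (p : Int)).length = L.length + 1 + Rin.length := by
    simp [hocc]; omega
  have hgetPrev : ∀ hne : L ≠ [], (occList cells (p : Int)).getD (L.length - 1) 0
      = ((L.getLast hne : Nat) : Int) := by
    intro hne
    have hpos : 0 < L.length := List.length_pos_of_ne_nil hne
    have hlt : L.length - 1 < L.length := by omega
    rw [hocc, List.getD_eq_getElem?_getD, List.getElem?_map,
        List.getElem?_append_left (by exact hlt), List.getElem?_eq_getElem hlt]
    simp [List.getLast_eq_getElem]
  have hgetNext : ∀ (k : Nat) (t : List Nat), Rin = k :: t →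
      (occList cells (p : Int)).getD (L.length + 1) 0 = ((p + 1 + k : Nat) : Int) := by
    intro k t hRin
    rw [hocc, List.getD_eq_getElem?_getD, List.getElem?_map,
        List.getElem?_append_right (by omega)]
    simp [hRin]
  have hTake : firstBP ((cells.take p).reverse)
      = L.getLast?.map (fun k => cells.getD k "") := by
    rw [firstBP, find?_reverse_eq_getLast_filter]
    have hlt : (cells.take p).length = p := by rw [List.length_take]; omega
    rw [hlt]
    have hfil : (List.range p).filter (fun k => blkBP ((cells.take p).getD k "")) = L := by
      apply List.filter_congr
      intro k hk
      have hk' := List.mem_range.mp hk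
      rw [List.getD_eq_getElem?_getD, List.getD_eq_getElem?_getD,
          List.getElem?_take_of_lt hk']
    rw [hfil]
    cases hLast : L.getLast? with
    | none => rfl
    | some k =>
        have hk : k < p := List.mem_range.mp (List.mem_of_mem_filter (List.mem_of_getLast? hLast))
        simp [List.getD_eq_getElem?_getD, List.getElem?_take_of_lt hk]
  have hDrop : firstBP (cells.drop (p + 1))
      = Rin.head?.map (fun k => cells.getD (p + 1 + k) "") := by
    rw [firstBP, find?_eq_head_filter]
    have hld : (cells.drop (p + 1)).length = cells.length - (p + 1) := by simp
    rw [hld]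
    have hfil : (List.range (cells.length - (p + 1))).filter
        (fun k => blkBP ((cells.drop (p + 1)).getD k "")) = Rin := by
      apply List.filter_congr
      intro k hk
      rw [List.getD_eq_getElem?_getD, List.getD_eq_getElem?_getD, List.getElem?_drop]
    rw [hfil]
    cases hHead : Rin.head? with
    | none => rfl
    | some k => simp [List.getD_eq_getElem?_getD, List.getElem?_drop]
  simp only [axisCount, hidx]
  rw [hTake, hDrop]
  have e1 : (if 0 < L.length ∧
        PySem.List.pyGetD cells ((occList cells (p : Int)).getD (L.length - 1) 0) "" = "p"
      then (1 : Int) else 0)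
      = (if L.getLast?.map (fun k => cells.getD k "") = some "p" then (1 : Int) else 0) := by
    cases hLast : L.getLast? with
    | none =>
        have hnil : L = [] := List.getLast?_eq_none_iff.mp hLast
        simp [hnil]
    | some k =>
        have hne : L ≠ [] := by
          intro h
          rw [h] at hLast
          simp at hLast
        have hk : L.getLast hne = k := by
          rw [List.getLast?_eq_some_getLast hne] at hLast
          exact Option.some.inj hLast
        rw [hgetPrev hne, hk]
        have hpos : 0 < L.length := List.length_pos_of_ne_nil hne
        simp [PySem.List.pyGetD_natCast, hpos]
  have e2 : (if L.length + 1 < (occList cells (p : Int)).length ∧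
        PySem.List.pyGetD cells ((occList cells (p : Int)).getD (L.length + 1) 0) "" = "p"
      then (1 : Int) else 0)
      = (if Rin.head?.map (fun k => cells.getD (p + 1 + k) "") = some "p"
          then (1 : Int) else 0) := by
    cases hRin : Rin with
    | nil => simp [hlen, hRin]
    | cons k t =>
        have hcond : L.length + 1 < (occList cells (p : Int)).length := by
          rw [hlen, hRin]; simp only [List.length_cons]; omega
        rw [hgetNext k t hRin, PySem.List.pyGetD_natCast]
        simp [hcond]
  rw [e1, e2]

lemma numRookCaptures_eq_alt (board : List (List String)) (i j : Nat)
    (h : findRook board = some (i, j))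
    (hlen : ∀ row ∈ board, j < row.length) :
    numRookCaptures board = numRookCaptures_alt board := by
  obtain ⟨hi, hidx⟩ := findRook_spec board i j h
  obtain ⟨hjlen, hRj, -⟩ := PySem.List.getElem_of_index?_eq_some hidx
  simp only [numRookCaptures, numRookCaptures_alt, h]
  have hrowI : PySem.List.pyGetD board (i : Int) [] = board[i] := by
    rw [PySem.List.pyGetD_natCast, List.getD_eq_getElem _ _ hi]
  rw [hrowI]
  set col := List.map (fun row => PySem.List.pyGetD row (j : Int) "") board with hcol
  have hcollen : col.length = board.length := by simp [hcol]
  have hcellC : ∀ k : Nat, k < board.length →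
      PySem.List.pyGetD (PySem.List.pyGetD board (k : Int) []) (j : Int) "" = col[k]?.getD "" := by
    intro k hk
    rw [PySem.List.pyGetD_natCast board, List.getD_eq_getElem _ _ hk]
    have h2 : j < (board[k]).length := hlen _ (List.getElem_mem hk)
    rw [PySem.List.pyGetD_natCast, List.getD_eq_getElem _ _ h2]
    simp [hcol, List.getElem?_eq_getElem hk, List.getElem?_eq_getElem h2,
          PySem.List.pyGetD_natCast]
  have hcellR : ∀ k : Nat, k < board[i].length →
      PySem.List.pyGetD board[i] (k : Int) "" = (board[i])[k]?.getD "" := by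
    intro k hk
    rw [PySem.List.pyGetD_natCast, List.getD_eq_getElem?_getD]
  have hic : i < col.length := by omega
  have hcoliR : col[i] = "R" := by
    have h1 := hcellC i hi
    rw [hrowI, PySem.List.pyGetD_natCast, List.getD_eq_getElem _ _ hjlen, hRj,
        List.getElem?_eq_getElem hic, Option.getD_some] at h1
    exact h1.symm
  have hm1 : (-1 : Int) + 1 = 0 := by norm_num
  have hcasti : ((i + 1 : Nat) : Int) = (i : Int) + 1 := by push_cast; ring
  have hcastj : ((j + 1 : Nat) : Int) = (j : Int) + 1 := by push_cast; ring
  -- ray UP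
  have hup0 : (PySem.List.pyRange 0 ((i + 1 : Nat) : Int)).map
      (fun k => PySem.List.pyGetD (PySem.List.pyGetD board k []) (j : Int) "") =
      col.take i ++ ["R"] := by
    rw [map_range_take col (i + 1) (by omega) _ (fun k hk => hcellC k (by omega)),
        List.take_add_one, List.getElem?_eq_getElem hic, hcoliR]
    rfl
  have hup : (PySem.List.pyRange (i : Int) (-1) (-1)).map
      (fun k => PySem.List.pyGetD (PySem.List.pyGetD board k []) (j : Int) "") =
      "R" :: (col.take i).reverse := by
    rw [PySem.List.pyRange_neg_one_eq_reverse, hm1, List.map_reverse, ← hcasti, hup0,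
        List.reverse_append]
    simp
  -- ray DOWN
  have hdown : (PySem.List.pyRange (i : Int) (board.length : Int)).map
      (fun k => PySem.List.pyGetD (PySem.List.pyGetD board k []) (j : Int) "") =
      "R" :: col.drop (i + 1) := by
    have hc2 : (board.length : Int) = (col.length : Int) := by rw [hcollen]
    rw [hc2, map_range_drop col i _ (fun k hk => hcellC k (by omega)),
        List.drop_eq_getElem_cons hic, hcoliR]
  -- ray LEFT
  have hleft0 : (PySem.List.pyRange 0 ((j + 1 : Nat) : Int)).map
      (fun k => PySem.List.pyGetD board[i] k "") =
      (board[i]).take j ++ ["R"] := by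
    rw [map_range_take (board[i]) (j + 1) (by omega) _ (fun k hk => hcellR k (by omega)),
        List.take_add_one, List.getElem?_eq_getElem hjlen, hRj]
    rfl
  have hleft : (PySem.List.pyRange (j : Int) (-1) (-1)).map
      (fun k => PySem.List.pyGetD board[i] k "") =
      "R" :: ((board[i]).take j).reverse := by
    rw [PySem.List.pyRange_neg_one_eq_reverse, hm1, List.map_reverse, ← hcastj, hleft0,
        List.reverse_append]
    simp
  -- ray RIGHT
  have hright : (PySem.List.pyRange (j : Int) ((board[i]).length : Int)).map
      (fun k => PySem.List.pyGetD board[i] k "") =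
      "R" :: (board[i]).drop (j + 1) := by
    rw [map_range_drop (board[i]) j _ (fun k hk => hcellR k hk),
        List.drop_eq_getElem_cons hjlen, hRj]
  rw [scanBreak_eq, scanBreak_eq, scanBreak_eq, scanBreak_eq,
      hup, hdown, hleft, hright,
      firstBP_cons_skip "R" _ (by decide) (by decide),
      firstBP_cons_skip "R" _ (by decide) (by decide),
      firstBP_cons_skip "R" _ (by decide) (by decide),
      firstBP_cons_skip "R" _ (by decide) (by decide),
      axisCount_eq board[i] j hjlen, axisCount_eq col i hic]
  ring

-- ===== VERDICT (by name: the statement is the Claim_ definition above) =====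
theorem numRookCaptures_spec : Claim_equal_numRookCaptures := by
  intro board _ hpre
  obtain ⟨i, hi, j, hjl, hRg, hfirst, hmin, hlenAll⟩ := hpre
  have hgd : board.getD i [] = board[i] := List.getD_eq_getElem _ _ hi
  rw [hgd] at hjl hRg hmin
  have hidx : PySem.List.index? board[i] "R" = some j := by
    rw [PySem.List.index?_eq_idxOf?, List.idxOf?_eq_some_iff]
    refine ⟨hjl, ?_, ?_⟩
    · rw [← List.getD_eq_getElem _ "" hjl]; exact hRg
    · intro k hk
      rw [← List.getD_eq_getElem _ "" (by omega)]
      exact hmin k hk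
  exact numRookCaptures_eq_alt board i j
    (findRook_eq_some board i j hi hfirst (hgd ▸ hidx)) hlenAll
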